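-- pv_equiv track=rewrite | github.com/Ziga12341/Advent-of-Code-2023 | python/Day 7/first_part.py | collect_ordered_categories
-- ===== SOURCE A (Python) =====
-- from operator import itemgetter
--
-- def reorder_hands_in_category(list_of_hands_in_category):
--     return sorted(list_of_hands_in_category, key=itemgetter(0))
--
-- def collect_ordered_categories(categories):
--     # dict of category
--     ranked_ordered_hands = []
--     for category_name, list_of_hands_with_bid_in_category in categories.items():
--         if list_of_hands_with_bid_in_category:
--             ordered_list_of_hands = reorder_hands_in_category(list_of_hands_with_bid_in_category)
--             for ordered_hands in ordered_list_of_hands: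
--                 ranked_ordered_hands.append(ordered_hands)
--     return (ranked_ordered_hands)
-- ===== SOURCE B (Python) =====
-- def collect_ordered_categories(categories):
--     # One global stable sort over index-tagged hands instead of per-category sorts.
--     tagged = [(i, hand) for i, hands in enumerate(categories.values()) for hand in hands]
--     return [hand for _, hand in sorted(tagged, key=lambda t: (t[0], t[1][0]))]
-- ===== Notes on version B (the rewrite author's own statement) =====
-- stated objective: alternative
-- what changed: Replaces the per-category sorts plus append loop with one flat list of (category-index, hand) pairs and a single global stable sort keyed by (index, hand string); stability plus the leading index reproduce the exact per-category order.
import Mathlib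
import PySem

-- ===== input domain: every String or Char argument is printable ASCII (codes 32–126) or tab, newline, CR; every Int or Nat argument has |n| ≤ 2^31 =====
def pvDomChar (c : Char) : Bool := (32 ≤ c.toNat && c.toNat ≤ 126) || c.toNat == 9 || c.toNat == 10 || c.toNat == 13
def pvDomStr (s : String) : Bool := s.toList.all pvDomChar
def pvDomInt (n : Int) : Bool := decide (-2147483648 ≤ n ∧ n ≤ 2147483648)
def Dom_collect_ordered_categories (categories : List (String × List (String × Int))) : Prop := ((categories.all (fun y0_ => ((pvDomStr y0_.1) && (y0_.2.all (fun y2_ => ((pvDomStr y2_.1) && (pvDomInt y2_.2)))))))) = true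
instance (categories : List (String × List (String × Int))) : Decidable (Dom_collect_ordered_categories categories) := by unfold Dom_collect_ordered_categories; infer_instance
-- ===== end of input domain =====

-- B replaces the per-category sorts + concatenation with one global stable sort of
-- index-tagged hands keyed by (category index, hand string); alternative decomposition, same cost class.


-- ===== PORT A =====
def reorder_hands_in_category (list_of_hands_in_category : List (String × Int)) : List (String × Int) :=
  PySem.List.sorted list_of_hands_in_category (fun p => p.1) false

def collect_ordered_categories (categories : List (String × List (String × Int))) : List (String × Int) :=
  ((PySem.Dict.ofList categories).items).foldl
    (fun ranked_ordered_hands p =>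
      if p.2 ≠ [] then
        (reorder_hands_in_category p.2).foldl (fun acc h => acc ++ [h]) ranked_ordered_hands
      else ranked_ordered_hands) []

-- ===== PORT B =====
def collect_ordered_categories_alt (categories : List (String × List (String × Int))) : List (String × Int) :=
  let tagged := (PySem.List.enumerate (PySem.Dict.ofList categories).values 0).flatMap
      (fun p => p.2.map (fun h => (p.1, h)))
  (PySem.List.sorted2 tagged (fun t => t.1) (fun t => t.2.1) false).map (fun t => t.2)

-- ===== PRECONDITION & SPEC =====
def Spec_collect_ordered_categories (categories : List (String × List (String × Int))) (out : List (String × Int)) : Prop := out = collect_ordered_categories_alt categories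
instance (categories : List (String × List (String × Int))) (out : List (String × Int)) : Decidable (Spec_collect_ordered_categories categories out) := by unfold Spec_collect_ordered_categories; infer_instance

-- ===== CLAIM (what is proved, stated in full; the proofs are below) =====
def Claim_equal_collect_ordered_categories : Prop := ∀ (categories : List (String × List (String × Int))), Dom_collect_ordered_categories categories → Spec_collect_ordered_categories categories (collect_ordered_categories categories)

-- ===== LEMMAS AND PROOFS =====

-- the comparison sorted2 uses on tagged hands
def pvB2 (x y : Int × (String × Int)) : Bool :=
  decide (x.1 < y.1) || (!decide (y.1 < x.1) && decide (x.2.1 < y.2.1))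

-- the comparison sorted uses on hands
def pvBS (x y : String × Int) : Bool := decide (x.1 < y.1)

theorem insertBy_nil {α : Type} (b : α → α → Bool) (x : α) :
    PySem.List.insertBy b x [] = [x] := rfl

theorem insertBy_cons {α : Type} (b : α → α → Bool) (x y : α) (ys : List α) :
    PySem.List.insertBy b x (y :: ys) =
      if b x y then x :: y :: ys else y :: PySem.List.insertBy b x ys := rfl

theorem foldl_append_singleton {α : Type} (l : List α) (acc : List α) :
    l.foldl (fun a h => a ++ [h]) acc = acc ++ l := by
  induction l generalizing acc with
  | nil => simp
  | cons x t ih => simp [List.foldl_cons, ih]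

theorem portA_flatten (items : List (String × List (String × Int))) (acc : List (String × Int)) :
    items.foldl
      (fun ranked_ordered_hands p =>
        if p.2 ≠ [] then
          (reorder_hands_in_category p.2).foldl (fun a h => a ++ [h]) ranked_ordered_hands
        else ranked_ordered_hands) acc
    = acc ++ items.flatMap (fun p => PySem.List.sorted p.2 (fun h => h.1) false) := by
  induction items generalizing acc with
  | nil => simp
  | cons x t ih =>
    rw [List.foldl_cons]
    by_cases hx : x.2 = []
    · rw [if_neg (by simp [hx]), ih]
      simp [hx, PySem.List.sorted]
    · rw [if_pos (by simpa using hx), foldl_append_singleton, ih]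
      simp [reorder_hands_in_category, List.flatMap_cons]

theorem insertBy_append_of_not_before {α : Type} (before : α → α → Bool) (x : α)
    (l1 l2 : List α) (h : ∀ y ∈ l1, before x y = false) :
    PySem.List.insertBy before x (l1 ++ l2) = l1 ++ PySem.List.insertBy before x l2 := by
  induction l1 with
  | nil => simp
  | cons y t ih =>
    have hy : before x y = false := h y (by simp)
    rw [List.cons_append, insertBy_cons, hy]
    simp only [Bool.false_eq_true, if_neg, not_false_iff, List.cons_append]
    rw [ih (fun z hz => h z (by simp [hz]))]

theorem insertBy_map_tag (i : Int) (h : String × Int) (M : List (String × Int)) :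
    PySem.List.insertBy pvB2 (i, h) (M.map (fun m => (i, m)))
      = (PySem.List.insertBy pvBS h M).map (fun m => (i, m)) := by
  induction M with
  | nil => simp [insertBy_nil]
  | cons m t ih =>
    have hb : pvB2 (i, h) (i, m) = pvBS h m := by simp [pvB2, pvBS]
    rw [List.map_cons, insertBy_cons, insertBy_cons, hb]
    by_cases hlt : pvBS h m = true
    · rw [if_pos hlt, if_pos hlt]; rfl
    · rw [if_neg hlt, if_neg hlt, List.map_cons, ih]

theorem group_fold (hs : List (String × Int)) (i : Int) :
    ∀ (M : List (String × Int)) (P : List (Int × (String × Int))), (∀ p ∈ P, p.1 < i) →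
    (hs.map (fun h => (i, h))).foldl (fun a x => PySem.List.insertBy pvB2 x a)
        (P ++ M.map (fun m => (i, m)))
      = P ++ (hs.foldl (fun a h => PySem.List.insertBy pvBS h a) M).map (fun m => (i, m)) := by
  induction hs with
  | nil => intro M P _; simp
  | cons h t ih =>
    intro M P hP
    simp only [List.map_cons, List.foldl_cons]
    have hskip : ∀ y ∈ P, pvB2 (i, h) y = false := by
      intro y hy
      have hyi := hP y hy
      have h1 : ¬ (i < y.1) := not_lt.mpr (le_of_lt hyi)
      simp [pvB2, h1, hyi]
    rw [insertBy_append_of_not_before pvB2 (i, h) P _ hskip, insertBy_map_tag]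
    exact ih (PySem.List.insertBy pvBS h M) P hP

theorem mem_tagged_lt (vs : List (List (String × Int))) (q : Int × (String × Int))
    (hq : q ∈ (PySem.List.enumerate vs 0).flatMap (fun p => p.2.map (fun h => (p.1, h)))) :
    q.1 < (vs.length : Int) := by
  simp only [List.mem_flatMap] at hq
  obtain ⟨p, hp, hq2⟩ := hq
  rw [PySem.List.mem_enumerate_iff] at hp
  obtain ⟨k, hk, rfl⟩ := hp
  simp only [List.mem_map] at hq2
  obtain ⟨h, -, rfl⟩ := hq2
  simpa using hk

theorem sorted2_tagged (vs : List (List (String × Int))) :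
    PySem.List.sorted2
        ((PySem.List.enumerate vs 0).flatMap (fun p => p.2.map (fun h => (p.1, h))))
        (fun t => t.1) (fun t => t.2.1) false
      = (PySem.List.enumerate vs 0).flatMap
          (fun p => (PySem.List.sorted p.2 (fun h => h.1) false).map (fun h => (p.1, h))) := by
  induction vs using List.reverseRecOn with
  | nil => simp [PySem.List.sorted2, PySem.List.enumerate_nil]
  | append_singleton vs l ih =>
    have henum : PySem.List.enumerate (vs ++ [l]) 0
        = PySem.List.enumerate vs 0 ++ [((vs.length : Int), l)] := by
      rw [PySem.List.enumerate_append]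
      simp [PySem.List.enumerate_cons, PySem.List.enumerate_nil]
    rw [henum, List.flatMap_append, List.flatMap_append]
    simp only [List.flatMap_cons, List.flatMap_nil, List.append_nil]
    show (((PySem.List.enumerate vs 0).flatMap (fun p => p.2.map (fun h => (p.1, h))))
          ++ l.map (fun h => ((vs.length : Int), h))).foldl
          (fun a x => PySem.List.insertBy pvB2 x a) []
        = _
    rw [List.foldl_append]
    have hsort : ((PySem.List.enumerate vs 0).flatMap
          (fun p => p.2.map (fun h => (p.1, h)))).foldl
          (fun a x => PySem.List.insertBy pvB2 x a) []
        = (PySem.List.enumerate vs 0).flatMap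
          (fun p => (PySem.List.sorted p.2 (fun h => h.1) false).map (fun h => (p.1, h))) := ih
    rw [hsort]
    have hP : ∀ p ∈ (PySem.List.enumerate vs 0).flatMap
        (fun p => (PySem.List.sorted p.2 (fun h => h.1) false).map (fun h => (p.1, h))),
        p.1 < (vs.length : Int) := by
      intro p hp
      apply mem_tagged_lt vs
      simp only [List.mem_flatMap] at hp ⊢
      obtain ⟨e, he, hp2⟩ := hp
      refine ⟨e, he, ?_⟩
      simp only [List.mem_map] at hp2 ⊢
      obtain ⟨h, hh, rfl⟩ := hp2
      exact ⟨h, (PySem.List.mem_sorted _ _ _ _).1 hh, rfl⟩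
    have hg := group_fold l (vs.length : Int) []
      ((PySem.List.enumerate vs 0).flatMap
        (fun p => (PySem.List.sorted p.2 (fun h => h.1) false).map (fun h => (p.1, h)))) hP
    simp only [List.map_nil, List.append_nil] at hg
    rw [hg]
    rfl

theorem flatMap_enumerate_snd {β : Type} (vs : List (List (String × Int)))
    (g : List (String × Int) → List β) :
    ∀ s : Int, (PySem.List.enumerate vs s).flatMap (fun p => g p.2) = vs.flatMap g := by
  induction vs with
  | nil => intro s; simp [PySem.List.enumerate_nil]
  | cons v t ih => intro s; simp [PySem.List.enumerate_cons, ih]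

-- ===== VERDICT (by name: the statement is the Claim_ definition above) =====
theorem collect_ordered_categories_spec : Claim_equal_collect_ordered_categories := by
  intro categories _
  unfold Spec_collect_ordered_categories collect_ordered_categories collect_ordered_categories_alt
  rw [portA_flatten]
  show _ = ((PySem.List.sorted2
      ((PySem.List.enumerate (PySem.Dict.ofList categories).values 0).flatMap
        (fun p => p.2.map (fun h => (p.1, h))))
      (fun t => t.1) (fun t => t.2.1) false).map (fun t => t.2))
  rw [sorted2_tagged]
  rw [List.map_flatMap]
  simp only [List.map_map, Function.comp_def, List.map_id']
  rw [flatMap_enumerate_snd ((PySem.Dict.ofList categories).values)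
      (fun v => PySem.List.sorted v (fun h => h.1) false) 0]
  show [] ++ _ = _
  rw [List.nil_append]
  have hv : (PySem.Dict.ofList categories).values
      = ((PySem.Dict.ofList categories).items).map (fun p => p.2) := rfl
  rw [hv, List.flatMap_map]
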